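-- pv_equiv track=rewrite | github.com/MPAS-Dev/compass | compass/landice/tests/thwaites/uq_ensemble/job.py | _clean_up_whitespace
-- ===== SOURCE A (Python) =====
-- def _clean_up_whitespace(text):
--     prev_line = None
--     lines = text.split('\n')
--     trimmed = list()
--     # remove extra blank lines
--     for line in lines:
--         if line != '' or prev_line != '':
--             trimmed.append(line)
--             prev_line = line
--
--     line = ''
--     lines = list()
--     # remove blank lines between comments
--     for next_line in trimmed:
--         if line != '' or not next_line.startswith('#'):
--             lines.append(line)
--         line = next_line
--
--     # add the last line that we missed and an extra blank line
--     lines.extend([trimmed[-1], ''])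
--     text = '\n'.join(lines)
--     return text
-- ===== SOURCE B (Python) =====
-- def _clean_up_whitespace(text):
--     # Single fused pass: collapse blank runs and drop a blank directly before a
--     # comment, emitting each kept line one step behind (pending) for lookahead.
--     out = []
--     pending = ''          # synthetic leading blank waiting for lookahead
--     last_kept = None      # last line kept by blank-collapsing
--     for line in text.split('\n'):
--         if line == '' and last_kept == '':
--             continue
--         if not (pending == '' and line.startswith('#')):
--             out.append(pending)
--         pending = line
--         last_kept = line
--     out.append(pending)
--     out.append('')
--     return '\n'.join(out)
-- ===== Notes on version B (the rewrite author's own statement) =====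
-- stated objective: simpler
-- what changed: A's two sequential passes (blank-run collapsing into an intermediate list, then a sliding-window pass plus a trailing extend) are fused into one loop over the raw lines that keeps two pieces of state (last kept line for collapsing, pending line for comment lookahead), so no intermediate list and no negative indexing are needed.
import Mathlib
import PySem

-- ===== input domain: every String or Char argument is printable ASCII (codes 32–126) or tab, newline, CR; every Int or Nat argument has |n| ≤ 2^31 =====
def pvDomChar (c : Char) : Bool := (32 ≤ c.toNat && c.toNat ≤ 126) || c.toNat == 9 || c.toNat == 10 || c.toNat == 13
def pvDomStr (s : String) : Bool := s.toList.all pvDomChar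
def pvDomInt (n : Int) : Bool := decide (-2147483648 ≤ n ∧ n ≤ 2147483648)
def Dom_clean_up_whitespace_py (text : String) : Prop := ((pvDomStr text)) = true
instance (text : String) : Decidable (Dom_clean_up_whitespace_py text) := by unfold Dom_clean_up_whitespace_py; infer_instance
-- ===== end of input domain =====

-- B fuses A's two passes (blank-collapsing, then comment-lookahead emission + trailing
-- extend) into one loop with two state variables; return values proved equal on all inputs.

-- ===== PORT A =====
-- first loop: remove extra blank lines; prev is prev_line (none = Python None)
def cuwA_trim (prev : Option String) : List String → List String
  | [] => []
  | l :: ls =>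
    if l ≠ "" ∨ prev ≠ some "" then l :: cuwA_trim (some l) ls
    else cuwA_trim prev ls

-- second loop: remove blank lines between comments; line is the carried `line`
def cuwA_pass2 (line : String) : List String → List String
  | [] => []
  | n :: ns =>
    (if line ≠ "" ∨ ¬ (PySem.Str.startswith n "#") then [line] else []) ++ cuwA_pass2 n ns

def clean_up_whitespace_py (text : String) : String :=
  let trimmed := cuwA_trim none (((PySem.Str.split? text "\n").getD []))
  -- trimmed[-1]: trimmed is provably nonempty (split yields ≥ 1 line and the first is
  -- always appended), so the default of getLastD is unreachable
  PySem.Str.join "\n" (cuwA_pass2 "" trimmed ++ [trimmed.getLastD "", ""])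

-- ===== PORT B =====
-- single fused loop; state: pending (line awaiting lookahead) and lastKept
def cuwB_loop (pending : String) (lastKept : Option String) : List String → List String
  | [] => [pending, ""]
  | l :: ls =>
    if l = "" ∧ lastKept = some "" then cuwB_loop pending lastKept ls
    else (if pending = "" ∧ PySem.Str.startswith l "#" then [] else [pending]) ++
         cuwB_loop l (some l) ls

def clean_up_whitespace_py_alt (text : String) : String :=
  PySem.Str.join "\n" (cuwB_loop "" none (((PySem.Str.split? text "\n").getD [])))

-- ===== PRECONDITION & SPEC =====
def Spec_clean_up_whitespace_py (text : String) (out : String) : Prop := out = clean_up_whitespace_py_alt text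
instance (text : String) (out : String) : Decidable (Spec_clean_up_whitespace_py text out) := by unfold Spec_clean_up_whitespace_py; infer_instance

-- ===== CLAIM =====
def Claim_equal_clean_up_whitespace_py : Prop := ∀ (text : String), Dom_clean_up_whitespace_py text → Spec_clean_up_whitespace_py text (clean_up_whitespace_py text)

-- ===== LEMMAS AND PROOFS =====
theorem cuwB_eq_passes (ls : List String) : ∀ (prev : Option String) (pending : String),
    cuwB_loop pending prev ls =
      cuwA_pass2 pending (cuwA_trim prev ls) ++ [(cuwA_trim prev ls).getLastD pending, ""] := by
  induction ls with
  | nil => intro prev pending; simp [cuwB_loop, cuwA_trim, cuwA_pass2]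
  | cons l ls ih =>
    intro prev pending
    by_cases h : l = "" ∧ prev = some ""
    · have hk : ¬ (l ≠ "" ∨ prev ≠ some "") := by
        simp only [not_or, not_not]; exact ⟨h.1, h.2⟩
      simp [cuwB_loop, cuwA_trim, h, ih]
    · have hk : l ≠ "" ∨ prev ≠ some "" := by tauto
      simp only [cuwB_loop, cuwA_trim, if_pos hk, if_neg h, cuwA_pass2, ih (some l) l]
      have hlast : (l :: cuwA_trim (some l) ls).getLastD pending
          = (cuwA_trim (some l) ls).getLastD l := by
        cases cuwA_trim (some l) ls <;> simp [List.getLastD]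
      rw [hlast]
      by_cases he : pending = "" ∧ PySem.Str.startswith l "#" = true
      · simp [PySem.Str.startswith] at he ⊢
        simp [he]
      · simp [PySem.Str.startswith] at he ⊢
        rcases Decidable.em (pending = "") with hp | hp
        · simp [hp] at he ⊢
          simp [he]
        · simp [hp]

-- ===== VERDICT =====
theorem clean_up_whitespace_py_spec : Claim_equal_clean_up_whitespace_py := by
  intro text _
  unfold Spec_clean_up_whitespace_py clean_up_whitespace_py clean_up_whitespace_py_alt
  rw [cuwB_eq_passes]
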